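-- pv_equiv track=rewrite | github.com/20130353/Leetcode | target_offer/dfs+bfs+动态规划/字符串/回文添加一个字符让字符串变成回文串.py | addLeastPalindrome
-- ===== SOURCE A (Python) =====
-- def addLeastPalindrome(a, n):
--     dp = [[0] * n for _ in range(n)]
--     for i in range(n - 2, -1, -1):
--         dp[i][i + 1] = 0 if a[i + 1] == a[i] else 1
--         for j in range(i + 1, n):
--             if a[i] == a[j]:
--                 dp[i][j] = dp[i + 1][j - 1]
--             else:
--                 dp[i][j] = min(dp[i][j - 1], dp[i + 1][j]) + 1
--     if dp[0][n - 1] == 1: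
--         return 'YES'
--     else:
--         return 'NO'
-- ===== SOURCE B (Python) =====
-- def addLeastPalindrome(a, n):
--     # O(n) two-pointer: answer is YES iff a[:n] is not a palindrome but
--     # becomes one after skipping a single mismatched character.
--     def is_pal(i, j):
--         while i < j:
--             if a[i] != a[j]:
--                 return False
--             i += 1
--             j -= 1
--         return True
--
--     i, j = 0, n - 1
--     while i < j:
--         if a[i] != a[j]:
--             return 'YES' if is_pal(i + 1, j) or is_pal(i, j - 1) else 'NO'
--         i += 1
--         j -= 1
--     return 'NO'
-- ===== Notes on version B (the rewrite author's own statement) =====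
-- stated objective: faster
-- what changed: Replaces the O(n^2) interval DP table for minimum palindrome insertions by a linear two-pointer scan: the answer is YES iff the string is not a palindrome but becomes one after skipping one character at the first mismatch.
import Mathlib
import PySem

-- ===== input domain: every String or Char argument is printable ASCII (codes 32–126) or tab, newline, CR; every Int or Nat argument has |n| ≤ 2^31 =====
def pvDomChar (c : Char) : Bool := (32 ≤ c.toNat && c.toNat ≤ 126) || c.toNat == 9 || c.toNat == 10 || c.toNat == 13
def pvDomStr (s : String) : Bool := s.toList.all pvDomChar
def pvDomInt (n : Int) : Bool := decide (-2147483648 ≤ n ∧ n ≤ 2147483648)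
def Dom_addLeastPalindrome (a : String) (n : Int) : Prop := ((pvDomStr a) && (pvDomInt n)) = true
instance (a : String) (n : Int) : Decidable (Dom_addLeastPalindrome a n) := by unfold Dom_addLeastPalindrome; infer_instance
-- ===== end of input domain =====

-- B replaces A's O(n^2) interval-DP insertion count by an O(n) two-pointer scan.

-- ===== PORT A =====
-- a[i] for the in-range nonnegative indices the loops produce (exact there; Pre_ keeps them in range)
def pvCget (l : List Char) (i : Int) : Char := l.getD i.toNat ' '

-- dp[i][j] read / write (indices nonnegative and in range under Pre_)
def pvGetCell (dp : List (List Int)) (i j : Int) : Int := (dp.getD i.toNat []).getD j.toNat 0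

def pvSetCell (dp : List (List Int)) (i j : Int) (v : Int) : List (List Int) :=
  dp.set i.toNat ((dp.getD i.toNat []).set j.toNat v)

-- for j in range(i+1, n): …  (fuel = number of remaining iterations, n - j)
def pvInnerF (l : List Char) (n i : Int) : Nat → List (List Int) → Int → List (List Int)
  | 0, dp, _ => dp
  | f+1, dp, j =>
    if j < n then
      let dp' := if pvCget l i = pvCget l j then pvSetCell dp i j (pvGetCell dp (i+1) (j-1))
                 else pvSetCell dp i j (min (pvGetCell dp i (j-1)) (pvGetCell dp (i+1) j) + 1)
      pvInnerF l n i f dp' (j+1)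
    else dp

-- for i in range(n-2, -1, -1): …  (fuel = number of remaining iterations, i + 1)
def pvOuterF (l : List Char) (n : Int) : Nat → List (List Int) → Int → List (List Int)
  | 0, dp, _ => dp
  | f+1, dp, i =>
    if 0 ≤ i then
      let dp1 := pvSetCell dp i (i+1) (if pvCget l (i+1) = pvCget l i then 0 else 1)
      pvOuterF l n f (pvInnerF l n i (n - (i+1)).toNat dp1 (i+1)) (i-1)
    else dp

def addLeastPalindrome (a : String) (n : Int) : String :=
  let l := a.toList
  let dp := pvOuterF l n (n-1).toNat (List.replicate n.toNat (List.replicate n.toNat 0)) (n - 2)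
  if pvGetCell dp 0 (n-1) = 1 then "YES" else "NO"

-- ===== PORT B =====
-- is_pal(i, j) of Source B (fuel = j - i bounds the while loop, which consumes 2 per step)
def pvIsPalF (l : List Char) : Nat → Int → Int → Bool
  | 0, _, _ => true
  | f+1, i, j =>
    if i < j then
      if pvCget l i ≠ pvCget l j then false else pvIsPalF l f (i+1) (j-1)
    else true

def pvIsPal (l : List Char) (i j : Int) : Bool := pvIsPalF l (j - i).toNat i j

-- the main while loop of Source B
def pvScanF (l : List Char) : Nat → Int → Int → String
  | 0, _, _ => "NO"
  | f+1, i, j =>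
    if i < j then
      if pvCget l i ≠ pvCget l j then
        if pvIsPal l (i+1) j || pvIsPal l i (j-1) then "YES" else "NO"
      else pvScanF l f (i+1) (j-1)
    else "NO"

def addLeastPalindrome_alt (a : String) (n : Int) : String :=
  pvScanF a.toList (n-1).toNat 0 (n-1)

-- ===== PRECONDITION & SPEC =====
-- A raises IndexError when n ≤ 0 (dp[0] on an empty table) and when n ≥ 2 with n > len(a)
-- (a[n-1] out of range); Pre_ excludes exactly those raising inputs (n = 1 never touches a).
def Pre_addLeastPalindrome (a : String) (n : Int) : Prop :=
  1 ≤ n ∧ (n ≤ (a.length : Int) ∨ n = 1)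
instance (a : String) (n : Int) : Decidable (Pre_addLeastPalindrome a n) := by
  unfold Pre_addLeastPalindrome; infer_instance
def pvWitness_addLeastPalindrome : String × Int := ("ab", 2)

def Spec_addLeastPalindrome (a : String) (n : Int) (out : String) : Prop := out = addLeastPalindrome_alt a n
instance (a : String) (n : Int) (out : String) : Decidable (Spec_addLeastPalindrome a n out) := by unfold Spec_addLeastPalindrome; infer_instance

-- ===== CLAIM (what is proved, stated in full; the proofs are below) =====
def Claim_equal_addLeastPalindrome : Prop := ∀ (a : String) (n : Int), Dom_addLeastPalindrome a n → Pre_addLeastPalindrome a n → Spec_addLeastPalindrome a n (addLeastPalindrome a n)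

-- ===== LEMMAS AND PROOFS =====

-- reference value: minimum insertions for the range [i, j] — A's dp recursion as a function
def pvMinIns (l : List Char) (i j : Int) : Int :=
  if i < j then
    if pvCget l i = pvCget l j then pvMinIns l (i+1) (j-1)
    else min (pvMinIns l i (j-1)) (pvMinIns l (i+1) j) + 1
  else 0
termination_by (j - i).toNat
decreasing_by all_goals omega

theorem pvMinIns_nonneg (l : List Char) (i j : Int) : 0 ≤ pvMinIns l i j := by
  fun_induction pvMinIns l i j with
  | case1 => assumption
  | case2 ih1 ih2 => omega
  | case3 => simp

theorem pvMinIns_of_le (l : List Char) {i j : Int} (h : j ≤ i) : pvMinIns l i j = 0 := by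
  rw [pvMinIns, if_neg (by omega)]

-- pvIsPalF ignores extra fuel: any fuel ≥ j - i computes Source B's is_pal(i, j)
theorem pvIsPalF_fuel_irrel (l : List Char) :
    ∀ (f g : Nat) (i j : Int), (j - i).toNat ≤ f → (j - i).toNat ≤ g →
      pvIsPalF l f i j = pvIsPalF l g i j := by
  intro f
  induction f with
  | zero =>
      intro g i j hf hg
      have hji : ¬ i < j := by omega
      cases g with
      | zero => rfl
      | succ m => simp only [pvIsPalF, if_neg hji]
  | succ m ih =>
      intro g i j hf hg
      by_cases hij : i < j
      · cases g with
        | zero => omega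
        | succ k =>
            simp only [pvIsPalF, if_pos hij]
            split
            · rfl
            · exact ih k (i+1) (j-1) (by omega) (by omega)
      · cases g with
        | zero => simp only [pvIsPalF, if_neg hij]
        | succ k => simp only [pvIsPalF, if_neg hij]

theorem pvIsPalF_fuel (l : List Char) (f : Nat) (i j : Int) (h : (j - i).toNat ≤ f) :
    pvIsPalF l f i j = pvIsPal l i j :=
  pvIsPalF_fuel_irrel l f (j - i).toNat i j h le_rfl

theorem pvIsPal_step (l : List Char) {i j : Int} (h : i < j) :
    pvIsPal l i j = if pvCget l i ≠ pvCget l j then false else pvIsPal l (i+1) (j-1) := by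
  have h1 : (j - i).toNat = ((j - i).toNat - 1) + 1 := by omega
  rw [pvIsPal, h1]
  simp only [pvIsPalF, if_pos h]
  split
  · rfl
  · exact pvIsPalF_fuel l ((j - i).toNat - 1) (i+1) (j-1) (by omega)

theorem pvIsPal_of_not_lt (l : List Char) {i j : Int} (h : ¬ i < j) : pvIsPal l i j = true := by
  rw [pvIsPal, show (j - i).toNat = 0 by omega]
  rfl

theorem pvMinIns_zero_iff (l : List Char) (i j : Int) :
    pvMinIns l i j = 0 ↔ pvIsPal l i j = true := by
  fun_induction pvMinIns l i j with
  | case1 i j h he ih =>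
      rw [pvIsPal_step l h, if_neg (fun hh => hh he)]
      exact ih
  | case2 i j h he ih1 ih2 =>
      rw [pvIsPal_step l h, if_pos he]
      have := pvMinIns_nonneg l i (j-1)
      have := pvMinIns_nonneg l (i+1) j
      simp only [Bool.false_eq_true, iff_false]
      omega
  | case3 i j h =>
      simp [pvIsPal_of_not_lt l h]

theorem pvScan_eq (l : List Char) :
    ∀ (f : Nat) (i j : Int), (j - i).toNat ≤ 2 * f →
      pvScanF l f i j = if pvMinIns l i j = 1 then "YES" else "NO" := by
  intro f
  induction f with
  | zero =>
      intro i j hf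
      simp only [pvScanF]
      rw [pvMinIns_of_le l (by omega), if_neg (by norm_num)]
  | succ m ih =>
      intro i j hf
      by_cases hij : i < j
      · simp only [pvScanF, if_pos hij]
        by_cases he : pvCget l i = pvCget l j
        · have hrec : pvMinIns l i j = pvMinIns l (i+1) (j-1) := by
            rw [pvMinIns, if_pos hij, if_pos he]
          rw [if_neg (fun hh => hh he), ih (i+1) (j-1) (by omega), hrec]
        · rw [if_pos he, pvMinIns, if_pos hij, if_neg he]
          have h1 := pvMinIns_nonneg l i (j-1)
          have h2 := pvMinIns_nonneg l (i+1) j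
          by_cases hp : (pvIsPal l (i+1) j || pvIsPal l i (j-1)) = true
          · rw [if_pos hp]
            rcases (by simpa using hp : pvIsPal l (i+1) j = true ∨ pvIsPal l i (j-1) = true)
              with hp' | hp'
            · have := (pvMinIns_zero_iff l (i+1) j).mpr hp'
              rw [if_pos (by omega)]
            · have := (pvMinIns_zero_iff l i (j-1)).mpr hp'
              rw [if_pos (by omega)]
          · rw [if_neg hp]
            have hp' : pvIsPal l (i+1) j = false ∧ pvIsPal l i (j-1) = false := by
              cases hb1 : pvIsPal l (i+1) j <;> cases hb2 : pvIsPal l i (j-1) <;> simp_all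
            have n1 : pvMinIns l (i+1) j ≠ 0 := fun hc => by
              have := (pvMinIns_zero_iff l (i+1) j).mp hc; simp [this] at hp'
            have n2 : pvMinIns l i (j-1) ≠ 0 := fun hc => by
              have := (pvMinIns_zero_iff l i (j-1)).mp hc; simp [this] at hp'
            rw [if_neg (by omega)]
      · simp only [pvScanF, if_neg hij]
        rw [pvMinIns_of_le l (by omega), if_neg (by norm_num)]

-- ---- table invariant for port A ----

def pvDims (dp : List (List Int)) (n : Int) : Prop :=
  dp.length = n.toNat ∧ ∀ r ∈ dp, r.length = n.toNat

theorem pvRow_len {dp : List (List Int)} {n : Int} (hd : pvDims dp n) {i : Nat}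
    (hlt : i < dp.length) : (dp.getD i []).length = n.toNat := by
  apply hd.2
  have : dp.getD i [] = dp[i] := by
    simp [List.getD_eq_getElem?_getD, List.getElem?_eq_getElem hlt]
  rw [this]
  exact List.getElem_mem _

theorem pvGetCell_set_self {dp : List (List Int)} {n i j : Int} (hd : pvDims dp n)
    (hi0 : 0 ≤ i) (hi : i < n) (hj0 : 0 ≤ j) (hj : j < n) (v : Int) :
    pvGetCell (pvSetCell dp i j v) i j = v := by
  have hlen := hd.1
  have hi' : i.toNat < dp.length := by omega
  have hrl : (dp.getD i.toNat []).length = n.toNat := pvRow_len hd hi'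
  have hrl2 : dp[i.toNat].length = n.toNat := by
    rw [← hrl]; simp [List.getD_eq_getElem?_getD, List.getElem?_eq_getElem hi']
  have hj' : j.toNat < n.toNat := by omega
  unfold pvGetCell pvSetCell
  simp [List.getD_eq_getElem?_getD, List.getElem?_set, hi', hrl2, hj']

theorem pvGetCell_set_other (dp : List (List Int)) {i j i' j' : Int} (v : Int)
    (hi0 : 0 ≤ i) (hj0 : 0 ≤ j) (hi0' : 0 ≤ i') (hj0' : 0 ≤ j')
    (hne : i' ≠ i ∨ j' ≠ j) :
    pvGetCell (pvSetCell dp i j v) i' j' = pvGetCell dp i' j' := by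
  unfold pvGetCell pvSetCell
  by_cases hii : i.toNat = i'.toNat
  · have hjj : j.toNat ≠ j'.toNat := by omega
    by_cases hlt : i.toNat < dp.length
    · have e1 : (dp.set i.toNat ((dp.getD i.toNat []).set j.toNat v)).getD i'.toNat []
          = (dp.getD i.toNat []).set j.toNat v := by
        simp only [List.getD_eq_getElem?_getD, List.getElem?_set, if_pos hii, if_pos hlt,
          Option.getD_some]
      rw [e1, List.getD_eq_getElem?_getD, List.getElem?_set, if_neg hjj,
        ← List.getD_eq_getElem?_getD, ← hii]
    · rw [List.set_eq_of_length_le (by omega)]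
  · simp only [List.getD_eq_getElem?_getD, List.getElem?_set, if_neg hii]

theorem pvDims_set {dp : List (List Int)} {n : Int} (hd : pvDims dp n) (i j v : Int) :
    pvDims (pvSetCell dp i j v) n := by
  obtain ⟨hlen, hrow⟩ := hd
  by_cases hlt : i.toNat < dp.length
  · refine ⟨by simp [pvSetCell, hlen], ?_⟩
    intro r hr
    rcases List.mem_or_eq_of_mem_set hr with h | h
    · exact hrow r h
    · subst h
      rw [List.length_set]
      exact pvRow_len ⟨hlen, hrow⟩ hlt
  · rw [pvSetCell, List.set_eq_of_length_le (by omega)]; exact ⟨hlen, hrow⟩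

def pvInv (l : List Char) (n : Int) (k : Int) (dp : List (List Int)) : Prop :=
  pvDims dp n ∧ ∀ i j : Int, 0 ≤ i → i < n → 0 ≤ j → j < n → (k ≤ i ∨ j ≤ i) →
    pvGetCell dp i j = pvMinIns l i j

-- the freshly written cell dp[i][j] holds pvMinIns l i j, given correct neighbours
theorem pvCell_step (l : List Char) {i j : Int} (hij : i < j)
    (dp : List (List Int)) {n : Int} (hd : pvDims dp n)
    (hi0 : 0 ≤ i) (hj : j < n)
    (hL : pvGetCell dp i (j-1) = pvMinIns l i (j-1))
    (hD : pvGetCell dp (i+1) (j-1) = pvMinIns l (i+1) (j-1))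
    (hR : pvGetCell dp (i+1) j = pvMinIns l (i+1) j) :
    pvGetCell
      (if pvCget l i = pvCget l j then pvSetCell dp i j (pvGetCell dp (i+1) (j-1))
       else pvSetCell dp i j (min (pvGetCell dp i (j-1)) (pvGetCell dp (i+1) j) + 1)) i j
      = pvMinIns l i j := by
  rw [pvMinIns, if_pos hij]
  split
  · rw [pvGetCell_set_self hd hi0 (by omega) (by omega) hj, hD]
  · rw [pvGetCell_set_self hd hi0 (by omega) (by omega) hj, hL, hR]

-- inner loop: extends row-i correctness from columns < j to all columns
theorem pvInner_inv (l : List Char) (n i : Int) (hi0 : 0 ≤ i) :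
    ∀ (fj : Nat) (j : Int) (dp : List (List Int)), i + 1 ≤ j → (n - j).toNat ≤ fj →
      pvDims dp n →
      (∀ i' j' : Int, 0 ≤ i' → i' < n → 0 ≤ j' → j' < n →
        ((i + 1 ≤ i' ∨ j' ≤ i') ∨ (i' = i ∧ j' < j)) →
        pvGetCell dp i' j' = pvMinIns l i' j') →
      pvDims (pvInnerF l n i fj dp j) n ∧
      (∀ i' j' : Int, 0 ≤ i' → i' < n → 0 ≤ j' → j' < n →
        ((i + 1 ≤ i' ∨ j' ≤ i') ∨ i' = i) →
        pvGetCell (pvInnerF l n i fj dp j) i' j' = pvMinIns l i' j') := by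
  intro fj
  induction fj with
  | zero =>
      intro j dp hij hfuel hd hc
      refine ⟨hd, ?_⟩
      intro i' j' h1 h2 h3 h4 h5
      apply hc i' j' h1 h2 h3 h4
      rcases h5 with h | h
      · exact Or.inl h
      · exact Or.inr ⟨h, by omega⟩
  | succ m ih =>
      intro j dp hij hfuel hd hc
      by_cases hjn : j < n
      · simp only [pvInnerF, if_pos hjn]
        have hin : i < n := by omega
        have hnew : pvGetCell
            (if pvCget l i = pvCget l j then pvSetCell dp i j (pvGetCell dp (i+1) (j-1))
             else pvSetCell dp i j (min (pvGetCell dp i (j-1)) (pvGetCell dp (i+1) j) + 1)) i j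
            = pvMinIns l i j := by
          apply pvCell_step l (by omega) dp hd hi0 hjn
          · by_cases hji : i + 1 ≤ j - 1
            · exact hc i (j-1) hi0 hin (by omega) (by omega) (Or.inr ⟨rfl, by omega⟩)
            · rw [hc i (j-1) hi0 hin (by omega) (by omega) (Or.inl (Or.inr (by omega))),
                pvMinIns_of_le l (by omega)]
          · by_cases hji : i + 1 ≤ j - 1
            · exact hc (i+1) (j-1) (by omega) (by omega) (by omega) (by omega) (Or.inl (Or.inl (by omega)))
            · rw [hc (i+1) (j-1) (by omega) (by omega) (by omega) (by omega) (Or.inl (Or.inr (by omega)))]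
          · exact hc (i+1) j (by omega) (by omega) (by omega) hjn (Or.inl (Or.inl (by omega)))
        set dp' := (if pvCget l i = pvCget l j then pvSetCell dp i j (pvGetCell dp (i+1) (j-1))
             else pvSetCell dp i j (min (pvGetCell dp i (j-1)) (pvGetCell dp (i+1) j) + 1)) with hdp'
        have hd' : pvDims dp' n := by
          rw [hdp']; split <;> exact pvDims_set hd _ _ _
        apply ih (j+1) dp' (by omega) (by omega) hd'
        intro i' j' h1 h2 h3 h4 h5
        by_cases hsame : i' = i ∧ j' = j
        · rw [hsame.1, hsame.2]; exact hnew
        · have hne : i' ≠ i ∨ j' ≠ j := by tauto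
          have : pvGetCell dp' i' j' = pvGetCell dp i' j' := by
            rw [hdp']; split <;> exact pvGetCell_set_other dp _ hi0 (by omega) h1 h3 hne
          rw [this]
          apply hc i' j' h1 h2 h3 h4
          rcases h5 with h | ⟨he, hlt⟩
          · exact Or.inl h
          · exact Or.inr ⟨he, by omega⟩
      · simp only [pvInnerF, if_neg hjn]
        refine ⟨hd, ?_⟩
        intro i' j' h1 h2 h3 h4 h5
        apply hc i' j' h1 h2 h3 h4
        rcases h5 with h | h
        · exact Or.inl h
        · exact Or.inr ⟨h, by omega⟩

theorem pvOuter_inv (l : List Char) (n : Int) :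
    ∀ (fi : Nat) (i : Int) (dp : List (List Int)), (i + 1).toNat ≤ fi →
      pvInv l n (i+1) dp → pvInv l n 0 (pvOuterF l n fi dp i) := by
  intro fi
  induction fi with
  | zero =>
      intro i dp hfuel hinv
      refine ⟨hinv.1, ?_⟩
      intro i' j' h1 h2 h3 h4 h5
      apply hinv.2 i' j' h1 h2 h3 h4
      rcases h5 with h | h
      · exact Or.inl (by omega)
      · exact Or.inr h
  | succ m ih =>
      intro i dp hfuel hinv
      by_cases hi0 : 0 ≤ i
      · simp only [pvOuterF, if_pos hi0]
        obtain ⟨hd, hc⟩ := hinv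
        show pvInv l n 0 (pvOuterF l n m
          (pvInnerF l n i (n - (i+1)).toNat (pvSetCell dp i (i+1)
            (if pvCget l (i+1) = pvCget l i then 0 else 1)) (i+1)) (i-1))
        set v0 : Int := if pvCget l (i+1) = pvCget l i then 0 else 1 with hv0
        have hd1 : pvDims (pvSetCell dp i (i+1) v0) n := pvDims_set hd _ _ _
        have hinner := pvInner_inv l n i hi0 (n - (i+1)).toNat (i+1)
          (pvSetCell dp i (i+1) v0) (by omega) (by omega) hd1 ?_
        · apply ih (i-1) _ (by omega)
          refine ⟨hinner.1, ?_⟩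
          intro i' j' h1 h2 h3 h4 h5
          apply hinner.2 i' j' h1 h2 h3 h4
          rcases h5 with h | h
          · by_cases hii : i' = i
            · exact Or.inr hii
            · exact Or.inl (Or.inl (by omega))
          · exact Or.inl (Or.inr h)
        · intro i' j' h1 h2 h3 h4 h5
          have hne : i' ≠ i ∨ j' ≠ i + 1 := by omega
          rw [pvGetCell_set_other dp v0 hi0 (by omega) h1 h3 hne]
          apply hc i' j' h1 h2 h3 h4
          rcases h5 with h | h
          · rcases h with h | h
            · exact Or.inl (by omega)
            · exact Or.inr h
          · exact Or.inr (by omega)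
      · simp only [pvOuterF, if_neg hi0]
        refine ⟨hinv.1, ?_⟩
        intro i' j' h1 h2 h3 h4 h5
        apply hinv.2 i' j' h1 h2 h3 h4
        rcases h5 with h | h
        · exact Or.inl (by omega)
        · exact Or.inr h

theorem pvInv_init (l : List Char) (n : Int) :
    pvInv l n (n-1) (List.replicate n.toNat (List.replicate n.toNat 0)) := by
  refine ⟨⟨by simp, ?_⟩, ?_⟩
  · intro r hr
    rw [List.eq_of_mem_replicate hr]; simp
  · intro i j h1 h2 h3 h4 h5
    have hz : pvGetCell (List.replicate n.toNat (List.replicate n.toNat 0)) i j = 0 := by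
      unfold pvGetCell
      simp only [List.getD_eq_getElem?_getD, List.getElem?_replicate]
      split <;> simp [List.getElem?_replicate] <;> split <;> simp
    rw [hz]
    rcases h5 with h | h
    · rw [pvMinIns_of_le l (by omega)]
    · rw [pvMinIns_of_le l h]

theorem main_eq (a : String) (n : Int) (hn : 1 ≤ n) :
    addLeastPalindrome a n = addLeastPalindrome_alt a n := by
  unfold addLeastPalindrome addLeastPalindrome_alt
  have hinv := pvOuter_inv a.toList n (n-1).toNat (n-2)
    (List.replicate n.toNat (List.replicate n.toNat 0)) (by omega)
    (by have := pvInv_init a.toList n; simpa [show n - 2 + 1 = n - 1 by ring] using this)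
  have hcell : pvGetCell (pvOuterF a.toList n (n-1).toNat
      (List.replicate n.toNat (List.replicate n.toNat 0)) (n-2)) 0 (n-1)
      = pvMinIns a.toList 0 (n-1) :=
    hinv.2 0 (n-1) le_rfl (by omega) (by omega) (by omega) (Or.inl le_rfl)
  rw [pvScan_eq a.toList (n-1).toNat 0 (n-1) (by omega)]
  simp only [hcell]

-- ===== VERDICT (by name: the statement is the Claim_ definition above) =====
theorem addLeastPalindrome_spec : Claim_equal_addLeastPalindrome := by
  intro a n _ hpre
  exact main_eq a n hpre.1
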